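-- pv_equiv track=rewrite | github.com/rixon/aoc2020 | 6/6_a.py | parse_groups
-- ===== SOURCE A (Python) =====
-- def parse_groups(records):
--   group_list = []
--   group = []
--   index = 0
--   for r in records:
--     if r == "\n":
--       index += 1
--       group_list.append(group)
--       group = []
--     else:
--       group.append(r.rstrip())
--   group_list.append(group)
--   return group_list
-- ===== SOURCE B (Python) =====
-- def parse_groups(records):
--   if "\n" in records:
--     i = records.index("\n")
--     return [[r.rstrip() for r in records[:i]]] + parse_groups(records[i + 1:])
--   return [[r.rstrip() for r in records]]
-- ===== Notes on version B (the rewrite author's own statement) =====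
-- stated objective: alternative
-- what changed: Replaced the single-pass accumulator loop (mutable current group + index counter) with a recursive decomposition that splits the list at the first '\n' separator and recurses on the remainder.
import Mathlib
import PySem

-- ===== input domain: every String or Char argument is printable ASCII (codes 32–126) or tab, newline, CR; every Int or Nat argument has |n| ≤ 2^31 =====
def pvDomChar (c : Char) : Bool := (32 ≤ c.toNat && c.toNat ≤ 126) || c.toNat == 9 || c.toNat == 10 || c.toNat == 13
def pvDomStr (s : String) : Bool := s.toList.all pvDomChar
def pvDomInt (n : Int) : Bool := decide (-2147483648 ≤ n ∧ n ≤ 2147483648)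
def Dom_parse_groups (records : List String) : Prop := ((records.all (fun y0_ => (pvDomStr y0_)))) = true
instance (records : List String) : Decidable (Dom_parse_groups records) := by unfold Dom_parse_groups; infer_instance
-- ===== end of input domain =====

-- B replaces A's single-pass accumulator loop by a recursive split at the first "\n" separator;
-- objective: alternative decomposition (same cost, no speed claim).

-- ===== PORT A =====
-- the loop body: state = (group_list, group, index)
def pgStep (st : List (List String) × List String × Int) (r : String) :
    List (List String) × List String × Int :=
  if r == "\n" then (st.1 ++ [st.2.1], [], st.2.2 + 1)
  else (st.1, st.2.1 ++ [PySem.Str.rstrip r], st.2.2)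

def parse_groups (records : List String) : List (List String) :=
  let st := records.foldl pgStep ([], [], 0)
  st.1 ++ [st.2.1]

-- ===== PORT B =====
-- '"\n" in records' + 'records.index("\n")' → PySem.List.index?; records[:i] / records[i+1:] with
-- 0 ≤ i < len are exactly List.take i / List.drop (i+1)
def parse_groups_alt (records : List String) : List (List String) :=
  match h : PySem.List.index? records "\n" with
  | some i =>
      ((records.take i).map PySem.Str.rstrip) :: parse_groups_alt (records.drop (i + 1))
  | none => [records.map PySem.Str.rstrip]
termination_by records.length
decreasing_by
  have := PySem.List.getElem_of_index?_eq_some h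
  obtain ⟨hk, -, -⟩ := this
  simp [List.length_drop]
  omega

-- ===== PRECONDITION & SPEC =====
def Spec_parse_groups (records : List String) (out : List (List String)) : Prop := out = parse_groups_alt records
instance (records : List String) (out : List (List String)) : Decidable (Spec_parse_groups records out) := by unfold Spec_parse_groups; infer_instance

-- ===== CLAIM (what is proved, stated in full; the proofs are below) =====
def Claim_equal_parse_groups : Prop := ∀ (records : List String), Dom_parse_groups records → Spec_parse_groups records (parse_groups records)

-- ===== LEMMAS AND PROOFS =====

theorem pgStep_sep (gl : List (List String)) (g : List String) (idx : Int) :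
    pgStep (gl, g, idx) "\n" = (gl ++ [g], [], idx + 1) := by simp [pgStep]

theorem pgStep_nosep (gl : List (List String)) (g : List String) (idx : Int)
    {r : String} (hr : r ≠ "\n") :
    pgStep (gl, g, idx) r = (gl, g ++ [PySem.Str.rstrip r], idx) := by simp [pgStep, hr]

-- unfolding lemmas for B's well-founded recursion
theorem alt_eq_none {records : List String}
    (h : PySem.List.index? records "\n" = none) :
    parse_groups_alt records = [records.map PySem.Str.rstrip] := by
  conv_lhs => rw [parse_groups_alt]
  split
  · next j hj => rw [h] at hj; cases hj
  · rfl

theorem alt_eq_some {records : List String} {i : Nat}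
    (h : PySem.List.index? records "\n" = some i) :
    parse_groups_alt records =
      ((records.take i).map PySem.Str.rstrip) :: parse_groups_alt (records.drop (i + 1)) := by
  conv_lhs => rw [parse_groups_alt]
  split
  · next j hj => rw [h] at hj; cases hj; rfl
  · next hn => rw [h] at hn; cases hn

-- A's loop from any state = its loop from the empty state, shifted
theorem pg_foldl_norm (rs : List String) (gl : List (List String)) (g : List String) (idx : Int) :
    rs.foldl pgStep (gl, g, idx) =
      (gl ++ (rs.foldl pgStep ([], g, 0)).1,
       (rs.foldl pgStep ([], g, 0)).2.1,
       idx + (rs.foldl pgStep ([], g, 0)).2.2) := by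
  induction rs generalizing gl g idx with
  | nil => simp
  | cons r rs ih =>
    by_cases hr : r = "\n"
    · subst hr
      rw [List.foldl_cons, List.foldl_cons, pgStep_sep, pgStep_sep]
      rw [ih (gl ++ [g]) [] (idx + 1), ih ([] ++ [g]) [] (0 + 1)]
      simp
      omega
    · rw [List.foldl_cons, List.foldl_cons, pgStep_nosep _ _ _ hr, pgStep_nosep _ _ _ hr]
      exact ih gl _ idx

-- a separator-free run only extends the current group
theorem pg_foldl_nosep (rs : List String) (g : List String) (idx : Int)
    (h : "\n" ∉ rs) :
    rs.foldl pgStep ([], g, idx) = ([], g ++ rs.map PySem.Str.rstrip, idx) := by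
  induction rs generalizing g with
  | nil => simp
  | cons r rs ih =>
    have hr : r ≠ "\n" := fun e => h (e ▸ List.mem_cons_self ..)
    rw [List.foldl_cons, pgStep_nosep _ _ _ hr, ih _ (fun m => h (List.mem_cons_of_mem _ m))]
    simp

theorem pg_main (n : Nat) : ∀ (records : List String), records.length ≤ n →
    parse_groups records = parse_groups_alt records := by
  induction n with
  | zero =>
    intro records h
    have : records = [] := List.eq_nil_of_length_eq_zero (Nat.le_zero.mp h)
    subst this
    rw [alt_eq_none rfl]
    rfl
  | succ n ih =>
    intro records hlen
    show (List.foldl pgStep ([], [], 0) records).1 ++ [(List.foldl pgStep ([], [], 0) records).2.1] = _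
    cases h : PySem.List.index? records "\n" with
    | none =>
      have hmem : "\n" ∉ records := (PySem.List.index?_eq_none_iff _ _).mp h
      rw [pg_foldl_nosep _ _ _ hmem, alt_eq_none h]
      simp
    | some i =>
      obtain ⟨pre, suf, hsplit, hlen_pre, hpre⟩ := (PySem.List.index?_eq_some_iff _ _ _).mp h
      have htake : records.take i = pre := by
        subst hsplit hlen_pre; simp
      have hdrop : records.drop (i + 1) = suf := by
        subst hlen_pre
        rw [hsplit, show pre ++ "\n" :: suf = (pre ++ ["\n"]) ++ suf by simp,
            List.drop_left' (by simp)]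
      have hsuf : suf.length ≤ n := by
        have h2 : pre.length + (suf.length + 1) ≤ n + 1 := by
          have h3 := hlen
          rw [hsplit] at h3
          simpa using h3
        omega
      have hihs := ih suf hsuf
      rw [alt_eq_some h]
      rw [htake]
      rw [hdrop]
      rw [hsplit]
      rw [List.foldl_append, pg_foldl_nosep _ _ _ hpre, List.foldl_cons, pgStep_sep, pg_foldl_norm]
      rw [← hihs]
      show _ = _ :: ((List.foldl pgStep ([], [], 0) suf).1 ++ [(List.foldl pgStep ([], [], 0) suf).2.1])
      simp

-- ===== VERDICT (by name: the statement is the Claim_ definition above) =====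
theorem parse_groups_spec : Claim_equal_parse_groups := by
  intro records _
  exact pg_main records.length records (le_refl _)
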